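-- pv_equiv track=rewrite | github.com/Pablomm12/TerrorTesis | services/materia_prima.py | find_ingredient_code_in_materia_prima
-- ===== SOURCE A (Python) =====
-- def find_ingredient_code_in_materia_prima(ingredient_name_or_code: str, materia_prima: dict) -> tuple:
--     """
--     Find the actual ingredient code in materia_prima dictionary.
--     Handles both ingredient names and codes.
--
--     Returns:
--     - (mp_code, mp_info) if found
--     - (None, None) if not found
--     """
--     if not ingredient_name_or_code or not materia_prima:
--         return None, None
--
--     # Method 1: Direct code lookup
--     if ingredient_name_or_code in materia_prima:
--         return ingredient_name_or_code, materia_prima[ingredient_name_or_code]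
--
--     # Method 2: Search by name (case-insensitive)
--     search_name = str(ingredient_name_or_code).strip().lower()
--     for mp_code, mp_info in materia_prima.items():
--         if isinstance(mp_info, dict):
--             mp_name = mp_info.get('nombre', '').strip().lower()
--             if mp_name == search_name:
--                 return mp_code, mp_info
--
--     # Method 3: Partial name match
--     for mp_code, mp_info in materia_prima.items():
--         if isinstance(mp_info, dict):
--             mp_name = mp_info.get('nombre', '').strip().lower()
--             if search_name in mp_name or mp_name in search_name:
--                 return mp_code, mp_info
--
--     return None, None
-- ===== SOURCE B (Python) =====
-- def find_ingredient_code_in_materia_prima(ingredient_name_or_code: str, materia_prima: dict) -> tuple: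
--     """Single pass: exact code lookup, then one scan that returns on an exact
--     (case-insensitive) name hit and remembers the first partial match."""
--     if not ingredient_name_or_code or not materia_prima:
--         return None, None
--
--     if ingredient_name_or_code in materia_prima:
--         return ingredient_name_or_code, materia_prima[ingredient_name_or_code]
--
--     search_name = ingredient_name_or_code.strip().lower()
--     partial = None
--     for mp_code, mp_info in materia_prima.items():
--         if isinstance(mp_info, dict):
--             mp_name = mp_info.get('nombre', '').strip().lower()
--             if mp_name == search_name:
--                 return mp_code, mp_info
--             if partial is None and (search_name in mp_name or mp_name in search_name):
--                 partial = (mp_code, mp_info)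
--
--     if partial is not None:
--         return partial
--     return None, None
-- ===== Notes on version B (the rewrite author's own statement) =====
-- stated objective: alternative
-- what changed: The two separate full name-scanning loops (exact pass, then partial pass) are fused into one loop that returns on an exact name hit and records the first partial candidate on the fly, returning it after the scan.
import Mathlib
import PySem

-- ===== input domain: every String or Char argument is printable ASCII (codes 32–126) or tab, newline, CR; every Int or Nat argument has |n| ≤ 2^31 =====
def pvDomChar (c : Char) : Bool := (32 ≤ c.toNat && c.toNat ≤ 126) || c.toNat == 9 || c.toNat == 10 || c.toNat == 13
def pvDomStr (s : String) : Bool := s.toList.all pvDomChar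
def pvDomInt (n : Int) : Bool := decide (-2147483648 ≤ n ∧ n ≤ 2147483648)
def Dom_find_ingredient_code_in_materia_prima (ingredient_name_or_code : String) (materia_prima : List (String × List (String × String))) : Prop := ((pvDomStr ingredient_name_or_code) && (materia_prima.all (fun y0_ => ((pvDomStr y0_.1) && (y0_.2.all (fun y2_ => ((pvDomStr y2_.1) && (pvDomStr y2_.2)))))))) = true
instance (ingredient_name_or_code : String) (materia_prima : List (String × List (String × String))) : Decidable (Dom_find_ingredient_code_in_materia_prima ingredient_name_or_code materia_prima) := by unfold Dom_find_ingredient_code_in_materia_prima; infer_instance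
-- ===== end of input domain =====

-- B fuses A's two name-scanning passes (exact, then partial) into one loop that returns on an exact hit and remembers the first partial candidate; return values are identical.


-- ===== PORT A =====
-- shared helper: mp_info.get('nombre', '').strip().lower()
def pvName (info : List (String × String)) : String :=
  PySem.Str.lower (PySem.Str.strip (PySem.Dict.getD (PySem.Dict.mk info) "nombre" ""))

-- Method 2 loop of A: first exact (stripped, lowered) name match
def pvA_exact (search : String) : List (String × List (String × String)) → Option (String × List (String × String))
  | [] => none
  | (c, info) :: rest =>
    if pvName info == search then some (c, info) else pvA_exact search rest

-- Method 3 loop of A: first partial name match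
def pvA_partial (search : String) : List (String × List (String × String)) → Option (String × List (String × String))
  | [] => none
  | (c, info) :: rest =>
    if PySem.Str.isIn search (pvName info) || PySem.Str.isIn (pvName info) search then
      some (c, info)
    else pvA_partial search rest

def find_ingredient_code_in_materia_prima (ingredient_name_or_code : String) (materia_prima : List (String × List (String × String))) : Option String × (Option (List (String × String))) :=
  if ingredient_name_or_code == "" || materia_prima.isEmpty then (none, none)
  else
    match (PySem.Dict.mk materia_prima).get? ingredient_name_or_code with
    | some v => (some ingredient_name_or_code, some v)
    | none =>
      let search := PySem.Str.lower (PySem.Str.strip ingredient_name_or_code)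
      match pvA_exact search materia_prima with
      | some (c, i) => (some c, some i)
      | none =>
        match pvA_partial search materia_prima with
        | some (c, i) => (some c, some i)
        | none => (none, none)

-- ===== PORT B =====
-- single fused loop: return on exact name hit, remember first partial candidate
def pvB_loop (search : String) (cand : Option (String × List (String × String))) :
    List (String × List (String × String)) → Option String × (Option (List (String × String)))
  | [] =>
    match cand with
    | some (c, i) => (some c, some i)
    | none => (none, none)
  | (c, info) :: rest =>
    let name := pvName info
    if name == search then (some c, some info)
    else if cand.isNone && (PySem.Str.isIn search name || PySem.Str.isIn name search) then
      pvB_loop search (some (c, info)) rest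
    else
      pvB_loop search cand rest

def find_ingredient_code_in_materia_prima_alt (ingredient_name_or_code : String) (materia_prima : List (String × List (String × String))) : Option String × (Option (List (String × String))) :=
  if ingredient_name_or_code == "" || materia_prima.isEmpty then (none, none)
  else
    match (PySem.Dict.mk materia_prima).get? ingredient_name_or_code with
    | some v => (some ingredient_name_or_code, some v)
    | none =>
      pvB_loop (PySem.Str.lower (PySem.Str.strip ingredient_name_or_code)) none materia_prima

-- ===== PRECONDITION & SPEC =====
def Spec_find_ingredient_code_in_materia_prima (ingredient_name_or_code : String) (materia_prima : List (String × List (String × String))) (out : Option String × (Option (List (String × String)))) : Prop := out = find_ingredient_code_in_materia_prima_alt ingredient_name_or_code materia_prima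
instance (ingredient_name_or_code : String) (materia_prima : List (String × List (String × String))) (out : Option String × (Option (List (String × String)))) : Decidable (Spec_find_ingredient_code_in_materia_prima ingredient_name_or_code materia_prima out) := by unfold Spec_find_ingredient_code_in_materia_prima; infer_instance

-- ===== CLAIM (what is proved, stated in full; the proofs are below) =====
def Claim_equal_find_ingredient_code_in_materia_prima : Prop := ∀ (ingredient_name_or_code : String) (materia_prima : List (String × List (String × String))), Dom_find_ingredient_code_in_materia_prima ingredient_name_or_code materia_prima → Spec_find_ingredient_code_in_materia_prima ingredient_name_or_code materia_prima (find_ingredient_code_in_materia_prima ingredient_name_or_code materia_prima)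

-- ===== LEMMAS AND PROOFS =====
lemma pvB_loop_eq (search : String) (l : List (String × List (String × String)))
    (cand : Option (String × List (String × String))) :
    pvB_loop search cand l =
      match pvA_exact search l with
      | some (c, i) => (some c, some i)
      | none =>
        match cand with
        | some (c, i) => (some c, some i)
        | none =>
          match pvA_partial search l with
          | some (c, i) => (some c, some i)
          | none => (none, none) := by
  induction l generalizing cand with
  | nil => cases cand <;> simp [pvB_loop, pvA_exact, pvA_partial]
  | cons hd tl ih =>
    obtain ⟨c, info⟩ := hd
    by_cases hx : pvName info == search
    · simp [pvB_loop, pvA_exact, hx]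
    · by_cases hp : PySem.Chars.isIn search.toList (pvName info).toList = true ∨
          PySem.Chars.isIn (pvName info).toList search.toList = true
      · cases cand <;> cases he : pvA_exact search tl <;>
          simp [pvB_loop, pvA_exact, pvA_partial, hx, hp, ih, he]
      · cases cand <;> simp [pvB_loop, pvA_exact, pvA_partial, hx, hp, ih]

-- ===== VERDICT (by name: the statement is the Claim_ definition above) =====
theorem find_ingredient_code_in_materia_prima_spec : Claim_equal_find_ingredient_code_in_materia_prima := by
  intro s mp _
  unfold Spec_find_ingredient_code_in_materia_prima
  unfold find_ingredient_code_in_materia_prima find_ingredient_code_in_materia_prima_alt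
  by_cases h0 : s == "" || mp.isEmpty
  · simp [h0]
  · simp only [h0]
    cases hg : (PySem.Dict.mk mp).get? s with
    | some v => rfl
    | none =>
      simp only []
      rw [pvB_loop_eq]
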